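-- pv_equiv track=rewrite | github.com/skyeaaron/Misc | solitaire_simulation.py | streak_of_losses
-- ===== SOURCE A (Python) =====
-- import itertools
--
-- w = 48
--
-- def streak_of_losses(trial, w):
--     '''
--     Stole this code from https://stackoverflow.com/questions/53155345/count-longest-streak-of-0-in-a-python-list-python
--     and modified to return a streak of w losses
--     Only relevant if you are trying to do this for streaks of wins OR losses
--     '''
--     maxvalue=0
--     for game, group in itertools.groupby(trial):
--         if not game: #check if we lost the game
--             maxvalue = max(maxvalue, len(list(group)))
--             if maxvalue >= w:
--                 return True
--     return False
-- ===== SOURCE B (Python) =====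
-- def streak_of_losses(trial, w):
--     """Single-pass running counter of consecutive losses; no grouping, no max."""
--     count = 0
--     for game in trial:
--         if game:
--             count = 0
--         else:
--             count += 1
--             if count >= w:
--                 return True
--     return False
-- ===== Notes on version B (the rewrite author's own statement) =====
-- stated objective: simpler
-- what changed: Replaces itertools.groupby plus a running max over materialized group lengths with a single-pass counter of consecutive losses that resets on a win and returns as soon as the counter reaches w.
import Mathlib
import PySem

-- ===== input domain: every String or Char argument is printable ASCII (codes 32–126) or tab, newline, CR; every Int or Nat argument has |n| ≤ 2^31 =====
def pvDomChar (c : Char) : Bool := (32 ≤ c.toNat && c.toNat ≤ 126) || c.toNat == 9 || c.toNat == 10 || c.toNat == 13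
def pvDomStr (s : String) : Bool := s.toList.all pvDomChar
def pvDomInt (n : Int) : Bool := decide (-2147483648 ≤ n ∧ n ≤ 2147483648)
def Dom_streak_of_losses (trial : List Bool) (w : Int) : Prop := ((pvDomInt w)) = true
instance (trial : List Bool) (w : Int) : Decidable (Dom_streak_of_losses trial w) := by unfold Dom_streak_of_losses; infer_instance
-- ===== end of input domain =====

-- B replaces groupby + running max of group lengths by a single running counter of
-- consecutive losses (simpler decomposition, same O(n) cost).

-- ===== PORT A =====
-- hand port of itertools.groupby as run-length groups (value, length of run);
-- exact for Bool elements, where Python's == is Lean's ==.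
def pvGroups : List Bool → List (Bool × Nat)
  | [] => []
  | x :: xs =>
    match pvGroups xs with
    | (y, n) :: r => if x == y then (x, n + 1) :: r else (x, 1) :: (y, n) :: r
    | [] => [(x, 1)]

-- the for-loop over the groups, carrying maxvalue
def pvLoopA (gs : List (Bool × Nat)) (maxv : Nat) (w : Int) : Bool :=
  match gs with
  | [] => false
  | (game, len) :: rest =>
    if !game then
      let m := max maxv len
      if (m : Int) ≥ w then true else pvLoopA rest m w
    else pvLoopA rest maxv w

def streak_of_losses (trial : List Bool) (w : Int) : Bool :=
  pvLoopA (pvGroups trial) 0 w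

-- ===== PORT B =====
-- the for-loop of Source B, carrying count
def pvLoopB (l : List Bool) (count : Nat) (w : Int) : Bool :=
  match l with
  | [] => false
  | game :: rest =>
    if game then pvLoopB rest 0 w
    else
      let c := count + 1
      if (c : Int) ≥ w then true else pvLoopB rest c w

def streak_of_losses_alt (trial : List Bool) (w : Int) : Bool :=
  pvLoopB trial 0 w

-- ===== PRECONDITION & SPEC =====
def Spec_streak_of_losses (trial : List Bool) (w : Int) (out : Bool) : Prop := out = streak_of_losses_alt trial w
instance (trial : List Bool) (w : Int) (out : Bool) : Decidable (Spec_streak_of_losses trial w out) := by unfold Spec_streak_of_losses; infer_instance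

-- ===== CLAIM (what is proved, stated in full; the proofs are below) =====
def Claim_equal_streak_of_losses : Prop := ∀ (trial : List Bool) (w : Int), Dom_streak_of_losses trial w → Spec_streak_of_losses trial w (streak_of_losses trial w)

-- ===== LEMMAS AND PROOFS =====

-- canonical middle form: "some false-group has length ≥ w"
def pvHasRun (gs : List (Bool × Nat)) (w : Int) : Bool :=
  match gs with
  | [] => false
  | (g, n) :: r => if !g && decide ((n : Int) ≥ w) then true else pvHasRun r w

lemma loopA_eq_hasRun (gs : List (Bool × Nat)) (maxv : Nat) (w : Int)
    (h : (maxv : Int) < w) : pvLoopA gs maxv w = pvHasRun gs w := by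
  induction gs generalizing maxv with
  | nil => rfl
  | cons p r ih =>
    obtain ⟨g, n⟩ := p
    cases g with
    | false =>
      simp only [pvLoopA, pvHasRun, Bool.not_false, Bool.true_and]
      by_cases hn : (n : Int) ≥ w
      · have : ((max maxv n : Nat) : Int) ≥ w := by
          push_cast; omega
        simp [this, hn]
      · have : ¬ ((max maxv n : Nat) : Int) ≥ w := by
          push_cast; omega
        simp only [this, if_neg, hn, decide_false, if_false]
        exact ih _ (by omega)
    | true =>
      simp only [pvLoopA, pvHasRun, Bool.not_true, Bool.false_and, if_false]
      exact ih _ h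

-- first group of pvGroups (true :: t) is a true-group merging into pvGroups t
lemma hasRun_groups_true (t : List Bool) (w : Int) :
    pvHasRun (pvGroups (true :: t)) w = pvHasRun (pvGroups t) w := by
  simp only [pvGroups]
  match h : pvGroups t with
  | [] => simp [pvHasRun]
  | (true, n) :: r => simp [pvHasRun]
  | (false, n) :: r => simp [pvHasRun]

-- B's loop with carried count c (< w) equals the middle form with c merged into a
-- leading false-group
def pvHasRunC (gs : List (Bool × Nat)) (c : Nat) (w : Int) : Bool :=
  match gs with
  | (false, n) :: r => if ((c + n : Nat) : Int) ≥ w then true else pvHasRun r w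
  | _ => pvHasRun gs w

lemma hasRunC_zero (gs : List (Bool × Nat)) (w : Int) :
    pvHasRunC gs 0 w = pvHasRun gs w := by
  match gs with
  | [] => rfl
  | (true, n) :: r => rfl
  | (false, n) :: r => simp [pvHasRunC, pvHasRun]

lemma loopB_eq (l : List Bool) (c : Nat) (w : Int) (h : (c : Int) < w) :
    pvLoopB l c w = pvHasRunC (pvGroups l) c w := by
  induction l generalizing c with
  | nil => rfl
  | cons x t ih =>
    cases x with
    | true =>
      simp only [pvLoopB, if_true]
      rw [ih 0 (by omega), hasRunC_zero]
      have : pvHasRunC (pvGroups (true :: t)) c w = pvHasRun (pvGroups (true :: t)) w := by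
        simp only [pvGroups]
        match h2 : pvGroups t with
        | [] => rfl
        | (true, n) :: r => rfl
        | (false, n) :: r => rfl
      rw [this, hasRun_groups_true]
    | false =>
      simp only [pvLoopB, Bool.false_eq_true, if_false]
      simp only [pvGroups]
      match h2 : pvGroups t with
      | (false, n) :: r =>
        simp only [beq_self_eq_true, if_true, pvHasRunC]
        by_cases h1 : w ≤ (c : Int) + 1
        · have e2 : w ≤ (c : Int) + ((n : Int) + 1) := by omega
          simp [pvLoopB, h1, e2]
        · have h1' : ¬ ((c + 1 : Nat) : Int) ≥ w := by push_cast; omega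
          simp only [h1', if_neg, if_false, ge_iff_le, Nat.cast_add, Nat.cast_one, h1]
          rw [ih (c + 1) (by push_cast; omega), h2]
          simp only [pvHasRunC]
          have e3 : (c + 1) + n = c + (n + 1) := by omega
          rw [e3]
          push_cast
          ring_nf
      | [] =>
        simp only [pvHasRunC]
        by_cases h1 : w ≤ (c : Int) + 1
        · simp [pvLoopB, h1]
        · have h1' : ¬ ((c + 1 : Nat) : Int) ≥ w := by push_cast; omega
          simp only [h1', if_neg, if_false, ge_iff_le, Nat.cast_add, Nat.cast_one, h1]
          rw [ih (c + 1) (by push_cast; omega), h2]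
          simp [pvHasRunC, pvHasRun, h1]
      | (true, n) :: r =>
        simp only [pvHasRunC]
        by_cases h1 : w ≤ (c : Int) + 1
        · simp [pvLoopB, h1]
        · have h1' : ¬ ((c + 1 : Nat) : Int) ≥ w := by push_cast; omega
          simp only [h1', if_neg, if_false, ge_iff_le, Nat.cast_add, Nat.cast_one, h1]
          rw [ih (c + 1) (by push_cast; omega), h2]
          simp [pvHasRunC, pvHasRun, h1]

-- the w ≤ 0 corner: both loops fire on the first loss
lemma loopA_nonpos (gs : List (Bool × Nat)) (maxv : Nat) (w : Int) (h : w ≤ 0) :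
    pvLoopA gs maxv w = gs.any (fun p => !p.1) := by
  induction gs generalizing maxv with
  | nil => rfl
  | cons p r ih =>
    obtain ⟨g, n⟩ := p
    cases g with
    | false =>
      simp [pvLoopA]
      exact Or.inl (by omega)
    | true => simp [pvLoopA, ih]

lemma loopB_nonpos (l : List Bool) (c : Nat) (w : Int) (h : w ≤ 0) :
    pvLoopB l c w = l.any (fun x => !x) := by
  induction l generalizing c with
  | nil => rfl
  | cons x t ih =>
    cases x with
    | false =>
      simp [pvLoopB]
      exact Or.inl (by omega)
    | true => simp [pvLoopB, ih]

lemma groups_any (l : List Bool) :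
    (pvGroups l).any (fun p => !p.1) = l.any (fun x => !x) := by
  induction l with
  | nil => rfl
  | cons x t ih =>
    simp only [pvGroups]
    match h : pvGroups t with
    | [] =>
      rw [h] at ih
      simp at ih
      simp [ih]
    | (y, n) :: r =>
      rw [h] at ih
      by_cases hxy : x == y
      · have hx : x = y := by simpa using hxy
        subst hx
        simp only [hxy, if_true, List.any_cons] at *
        simp [← ih]
      · simp only [hxy, if_neg, List.any_cons, Bool.false_eq_true, if_false] at *
        simp [← ih]

-- ===== VERDICT (by name: the statement is the Claim_ definition above) =====
theorem streak_of_losses_spec : Claim_equal_streak_of_losses := by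
  intro trial w _
  unfold Spec_streak_of_losses streak_of_losses streak_of_losses_alt
  by_cases hw : 0 < w
  · rw [loopA_eq_hasRun _ _ _ (by omega), loopB_eq _ _ _ (by omega), hasRunC_zero]
  · rw [loopA_nonpos _ _ _ (by omega), loopB_nonpos _ _ _ (by omega), groups_any]
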